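-- pv_equiv track=rewrite | github.com/catoteig/julekalender2022 | knowitjulekalender/door_11/door_11.py | generate_counting_bits
-- ===== SOURCE A (Python) =====
-- def generate_counting_bits(parity, n):
--     skip = take = 0
--     matrix = []
--
--     for idx in range(2**n):
--         if skip == 0 and take == 0:
--             skip = take = parity
--
--         if skip > 0:
--             skip -= 1
--         elif take > 0:
--             matrix.append(idx)
--             take -= 1
--
--     return matrix
-- ===== SOURCE B (Python) =====
-- def generate_counting_bits(parity, n):
--     if parity <= 0:
--         return []
--     period = 2 * parity
--     return [idx for idx in range(2**n) if idx % period >= parity]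
-- ===== Notes on version B (the rewrite author's own statement) =====
-- stated objective: simpler
-- what changed: Replaced the stateful skip/take counter state machine with a stateless closed-form test per index (idx % (2*parity) >= parity), with an early return of [] for non-positive parity.
import Mathlib
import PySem

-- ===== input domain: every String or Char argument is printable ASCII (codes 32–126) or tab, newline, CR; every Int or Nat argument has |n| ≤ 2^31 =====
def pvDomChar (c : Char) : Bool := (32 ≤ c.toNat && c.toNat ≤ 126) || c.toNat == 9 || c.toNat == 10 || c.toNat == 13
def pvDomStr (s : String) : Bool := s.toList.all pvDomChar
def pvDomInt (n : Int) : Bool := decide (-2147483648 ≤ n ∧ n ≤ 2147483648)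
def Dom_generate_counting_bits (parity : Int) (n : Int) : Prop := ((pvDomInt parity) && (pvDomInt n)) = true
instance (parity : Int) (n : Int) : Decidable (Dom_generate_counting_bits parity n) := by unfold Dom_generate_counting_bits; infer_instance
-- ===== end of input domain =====

-- B replaces A's stateful skip/take counter machine with a stateless per-index
-- modular test (idx % (2*parity) >= parity), guarded by an early [] for parity <= 0 (simpler).


-- ===== PORT A =====
-- one iteration of A's loop body over the state (skip, take, matrix)
def gcbStep (parity : Int) (st : Int × Int × List Int) (idx : Int) : Int × Int × List Int :=
  let skip := st.1
  let take := st.2.1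
  let m := st.2.2
  let skip' := if skip = 0 ∧ take = 0 then parity else skip
  let take' := if skip = 0 ∧ take = 0 then parity else take
  if 0 < skip' then (skip' - 1, take', m)
  else if 0 < take' then (skip', take' - 1, m ++ [idx])
  else (skip', take', m)

def generate_counting_bits (parity : Int) (n : Int) : List Int :=
  ((PySem.List.pyRange 0 ((2:Int)^n.toNat) 1).foldl (gcbStep parity) (0, 0, [])).2.2

-- ===== PORT B =====
def generate_counting_bits_alt (parity : Int) (n : Int) : List Int :=
  if parity ≤ 0 then []
  else
    let period := 2 * parity
    (PySem.List.pyRange 0 ((2:Int)^n.toNat) 1).filter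
      (fun idx => decide (parity ≤ PySem.Int.mod idx period))

-- ===== PRECONDITION & SPEC =====
-- Pre_ excludes n < 0, on which Python A raises TypeError (range(2**n) with fractional 2**n).
def Pre_generate_counting_bits (parity : Int) (n : Int) : Prop := 0 ≤ n
instance (parity : Int) (n : Int) : Decidable (Pre_generate_counting_bits parity n) := by unfold Pre_generate_counting_bits; infer_instance
def pvWitness_generate_counting_bits : Int × Int := (2, 3)

def Spec_generate_counting_bits (parity : Int) (n : Int) (out : List Int) : Prop := out = generate_counting_bits_alt parity n
instance (parity : Int) (n : Int) (out : List Int) : Decidable (Spec_generate_counting_bits parity n out) := by unfold Spec_generate_counting_bits; infer_instance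

-- ===== CLAIM (what is proved, stated in full; the proofs are below) =====
def Claim_equal_generate_counting_bits : Prop := ∀ (parity : Int) (n : Int), Dom_generate_counting_bits parity n → Pre_generate_counting_bits parity n → Spec_generate_counting_bits parity n (generate_counting_bits parity n)

-- ===== LEMMAS AND PROOFS =====

-- the skip/take state A's loop holds just before processing index a, for 0 < parity
def skipOf (p a : Int) : Int :=
  if a % (2*p) = 0 then 0 else if a % (2*p) < p then p - a % (2*p) else 0
def takeOf (p a : Int) : Int :=
  if a % (2*p) = 0 then 0 else if a % (2*p) < p then p else 2*p - a % (2*p)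

lemma succ_emod (p a : Int) (hp : 0 < p) :
    (a+1) % (2*p) = if a % (2*p) = 2*p - 1 then 0 else a % (2*p) + 1 := by
  have h2p : 0 < 2*p := by omega
  have hr0 : 0 ≤ a % (2*p) := Int.emod_nonneg a (by omega)
  have hr1 : a % (2*p) < 2*p := Int.emod_lt_of_pos a h2p
  have h1 : (1:Int) % (2*p) = 1 := Int.emod_eq_of_lt (by omega) (by omega)
  have h : (a+1) % (2*p) = (a % (2*p) + 1) % (2*p) := by
    conv_lhs => rw [Int.add_emod, h1]
  split_ifs with hcase
  · rw [h, hcase]; simp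
  · rw [h, Int.emod_eq_of_lt (by omega) (by omega)]

lemma gcbStep_state (p a : Int) (m : List Int) (hp : 0 < p) :
    gcbStep p (skipOf p a, takeOf p a, m) a =
      (skipOf p (a+1), takeOf p (a+1),
       m ++ if p ≤ PySem.Int.mod a (2*p) then [a] else []) := by
  have h2p : 0 < 2*p := by omega
  have hr0 : 0 ≤ a % (2*p) := Int.emod_nonneg a (by omega)
  have hr1 : a % (2*p) < 2*p := Int.emod_lt_of_pos a h2p
  have hmod : PySem.Int.mod a (2*p) = a % (2*p) := PySem.Int.mod_eq_emod_of_pos h2p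
  have hsucc := succ_emod p a hp
  simp only [gcbStep, skipOf, takeOf, hmod, hsucc]
  generalize hgen : a % (2*p) = r at hr0 hr1 ⊢
  clear hmod hsucc hgen
  split_ifs <;> simp only [Prod.mk.injEq] <;> (try split_ifs)
  all_goals (try (exfalso; omega))
  all_goals refine ⟨?_, ?_, ?_⟩
  all_goals first | trivial | omega | simp

lemma loop_neg (p : Int) (hp : p ≤ 0) (L : List Int) :
    ∀ (s t : Int) (m : List Int), s ≤ 0 → t ≤ 0 →
      (L.foldl (gcbStep p) (s, t, m)).2.2 = m := by
  induction L with
  | nil => intro s t m _ _; rfl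
  | cons x xs ih =>
    intro s t m hs ht
    simp only [List.foldl_cons, gcbStep]
    split_ifs <;> simp_all <;> first | (apply ih <;> omega) | omega

lemma loop_pos (p : Int) (hp : 0 < p) (k : Nat) :
    ∀ (a : Int) (m : List Int),
      ((PySem.List.pyRange a (a + k) 1).foldl (gcbStep p) (skipOf p a, takeOf p a, m)).2.2
        = m ++ (PySem.List.pyRange a (a + k) 1).filter
            (fun idx => decide (p ≤ PySem.Int.mod idx (2*p))) := by
  induction k with
  | zero =>
    intro a m
    rw [PySem.List.pyRange_one_eq_nil (by omega)]
    simp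
  | succ k ih =>
    intro a m
    have hlt : a < a + (k+1 : Nat) := by push_cast; omega
    rw [PySem.List.pyRange_one_cons hlt]
    have heq : a + ((k+1 : Nat) : Int) = (a+1) + (k : Nat) := by push_cast; ring
    rw [heq]
    simp only [List.foldl_cons, List.filter_cons]
    rw [gcbStep_state p a m hp, ih (a+1)]
    by_cases h : p ≤ PySem.Int.mod a (2*p) <;> simp [h]

lemma main_eq (parity n : Int) (hn : 0 ≤ n) :
    generate_counting_bits parity n = generate_counting_bits_alt parity n := by
  unfold generate_counting_bits generate_counting_bits_alt
  by_cases hp : parity ≤ 0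
  · rw [if_pos hp, loop_neg parity hp _ 0 0 [] le_rfl le_rfl]
  · rw [if_neg hp]
    push_neg at hp
    have hthis := loop_pos parity hp (2^n.toNat) 0 []
    have hs : skipOf parity 0 = 0 := by simp [skipOf]
    have ht : takeOf parity 0 = 0 := by simp [takeOf]
    rw [hs, ht] at hthis
    rw [show (0:Int) + ((2^n.toNat : Nat) : Int) = (2:Int)^n.toNat by push_cast; ring] at hthis
    simpa using hthis

-- ===== VERDICT (by name: the statement is the Claim_ definition above) =====
theorem generate_counting_bits_spec : Claim_equal_generate_counting_bits := by
  intro parity n _ hpre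
  exact main_eq parity n hpre
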